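-- pv_equiv track=rewrite | github.com/Tphuong612/Python_Ptit | BienVaKieuDuLieuDonGian/py01056_ChanLeNguyenTo.py | check
-- ===== SOURCE A (Python) =====
-- import math
--
-- def nt(s):
--     if s<2:
--         return False
--     for i in range(2, int(math.sqrt(s))+1):
--         if s%i==0:
--             return False
--     return True
--
-- def check(n):
--     sum = 0
--     for i in range(len(n)):
--         sum += int(n[i])
--         if (i%2==0 and int(n[i])%2==1) or (i%2==1 and int(n[i])%2==0):
--             return False
--     if not nt(sum):
--         return False
--     return True
-- ===== SOURCE B (Python) =====
-- def check(n):
--     # stage 1: validate the alternating parity pattern: digit parity == index parity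
--     # iff (int(c) - i) is even; any() short-circuits at the first violation
--     if any((int(c) - i) % 2 for i, c in enumerate(n)):
--         return False
--     # stage 2: digit sum, tested for primality by exhaustive trial division
--     total = sum(int(c) for c in n)
--     return total >= 2 and all(total % d for d in range(2, total))
-- ===== Notes on version B (the rewrite author's own statement) =====
-- stated objective: alternative
-- what changed: A's fused early-return loop (running sum plus a two-case even/odd boolean test, sqrt-bounded trial division via helper nt) is replaced by a staged design: an any() parity scan testing (int(c)-i) % 2 arithmetically, then a separately computed digit sum tested for primality by exhaustive trial division over range(2, total) with no sqrt bound and no helper.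
import Mathlib
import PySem

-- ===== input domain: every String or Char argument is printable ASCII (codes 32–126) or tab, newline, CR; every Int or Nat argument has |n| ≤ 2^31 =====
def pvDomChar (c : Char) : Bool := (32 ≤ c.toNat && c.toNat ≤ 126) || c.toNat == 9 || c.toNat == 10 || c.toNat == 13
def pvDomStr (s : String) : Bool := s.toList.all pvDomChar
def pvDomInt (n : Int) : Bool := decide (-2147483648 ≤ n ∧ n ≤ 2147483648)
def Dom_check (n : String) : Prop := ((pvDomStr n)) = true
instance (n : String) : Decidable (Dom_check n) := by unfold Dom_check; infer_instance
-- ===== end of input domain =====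

-- B replaces A's fused early-return loop by a staged design: an arithmetic (int(c)-i)%2
-- parity scan (any), then the digit sum tested by exhaustive trial division over 2..total-1
-- instead of A's sqrt-bounded helper; same results, different validation pass and prime test.


-- int(c) for a single digit character (exact on Pre_: all characters reached are '0'..'9')
def digitVal (c : Char) : Int := (c.toNat : Int) - 48

-- ===== PORT A =====
-- same-module helper nt(s): sqrt-bounded trial division.
-- int(math.sqrt(s)) is ported as Nat.sqrt, exact on the digit sums reachable here.
def nt (s : Int) : Bool :=
  if s < 2 then false
  else (PySem.List.pyRange 2 ((Nat.sqrt s.toNat : Int) + 1) 1).all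
         (fun i => !(PySem.Int.mod s i == 0))

-- A's fused loop: add the digit to sum, early-return False on a parity violation.
def checkGo : List Char → Nat → Int → Bool
  | [], _, sum => if !(nt sum) then false else true
  | c :: rest, i, sum =>
      let sum' := sum + digitVal c
      if (i % 2 == 0 && digitVal c % 2 == 1) || (i % 2 == 1 && digitVal c % 2 == 0)
      then false
      else checkGo rest (i + 1) sum'

def check (n : String) : Bool := checkGo n.toList 0 0

-- ===== PORT B =====
-- staged: arithmetic (int(c)-i)%2 parity scan with any(), then sum, then full-range trial division.
def check_alt (n : String) : Bool :=
  if (PySem.List.enumerate n.toList).any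
       (fun p => !(PySem.Int.mod (digitVal p.2 - p.1) 2 == 0))
  then false
  else
    let total := (n.toList.map digitVal).sum
    decide (2 ≤ total) && (PySem.List.pyRange 2 total 1).all
      (fun d => !(PySem.Int.mod total d == 0))

-- ===== PRECONDITION & SPEC =====
-- Pre_ excludes exactly the inputs where A raises ValueError: a non-digit character that the
-- loop reaches, i.e. one preceded only by digits of the correct alternating parity. Every
-- character reached by int() must be a digit.
def Pre_check (n : String) : Prop :=
  ((List.range n.toList.length).all (fun k =>
    !((List.range k).all (fun j =>
        (n.toList[j]!).isDigit && (digitVal n.toList[j]! % 2 == (j : Int) % 2)))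
    || (n.toList[k]!).isDigit)) = true
instance (n : String) : Decidable (Pre_check n) := by unfold Pre_check; infer_instance
def pvWitness_check : String := "05"
def Spec_check (n : String) (out : Bool) : Prop := out = check_alt n
instance (n : String) (out : Bool) : Decidable (Spec_check n out) := by unfold Spec_check; infer_instance

-- ===== CLAIM (what is proved, stated in full; the proofs are below) =====
def Claim_equal_check : Prop := ∀ (n : String), Dom_check n → Pre_check n → Spec_check n (check n)

-- ===== LEMMAS AND PROOFS =====

-- B's arithmetic parity test agrees pointwise with A's digit-parity test.
lemma parity_ord (i : Int) (c : Char) :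
    (PySem.Int.mod (digitVal c - i) 2 == 0) = (digitVal c % 2 == i % 2) := by
  rw [PySem.Int.mod_eq_emod_of_pos (by norm_num : (0:Int) < 2)]
  rw [Bool.eq_iff_iff]
  simp only [beq_iff_eq, digitVal]
  omega

-- A's sqrt-bounded trial division equals B's exhaustive one (divisor pairing d ↔ s/d).
lemma nt_eq_full (s : Int) :
    nt s = (decide (2 ≤ s) &&
      (PySem.List.pyRange 2 s 1).all (fun d => !(PySem.Int.mod s d == 0))) := by
  by_cases h2 : s < 2
  · simp [nt, h2, show ¬ (2 ≤ s) by omega]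
  · push_neg at h2
    have hs0 : (s.toNat : Int) = s := Int.toNat_of_nonneg (by omega)
    set st : Int := (Nat.sqrt s.toNat : Int) with hst
    have hub : s < (st + 1) * (st + 1) := by
      have h := Nat.lt_succ_sqrt s.toNat
      have h' : (s.toNat : Int) < ((Nat.sqrt s.toNat + 1) * (Nat.sqrt s.toNat + 1) : Nat) := by
        exact_mod_cast h
      push_cast at h'; rw [hs0] at h'; linarith
    have hlt : st < s := by
      have h1 : 1 < s.toNat := by omega
      have h := Nat.sqrt_lt_self h1
      have h' : (Nat.sqrt s.toNat : Int) < (s.toNat : Int) := by exact_mod_cast h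
      omega
    rw [nt, if_neg (by omega : ¬ s < 2)]
    rw [show decide (2 ≤ s) = true from by simp [h2], Bool.true_and]
    rw [Bool.eq_iff_iff]
    simp only [List.all_eq_true, PySem.List.mem_pyRange_one, Bool.not_eq_eq_eq_not,
      Bool.not_true, beq_eq_false_iff_ne, ne_eq, PySem.Int.mod_eq_zero_iff_dvd]
    constructor
    · rintro H d ⟨hd2, hds⟩ hdvd
      by_cases hle : d ≤ st
      · exact H d ⟨hd2, by omega⟩ hdvd
      · push_neg at hle
        obtain ⟨e, he⟩ := hdvd
        have hd0 : 0 < d := by omega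
        have he0 : 0 < e := by nlinarith
        have he2 : 2 ≤ e := by nlinarith
        have hele : e ≤ st := by nlinarith
        exact H e ⟨he2, by omega⟩ ⟨d, by rw [he]; ring⟩
    · rintro H i ⟨hi2, hist⟩ hdvd
      exact H i ⟨hi2, by omega⟩ hdvd

lemma parity_iff (i : Nat) (c : Char) :
    (((i % 2 == 0 && digitVal c % 2 == 1) || (i % 2 == 1 && digitVal c % 2 == 0)) = false)
    ↔ (digitVal c % 2 == (i : Int) % 2) = true := by
  simp only [Bool.or_eq_false_iff, Bool.and_eq_false_iff, beq_iff_eq, beq_eq_false_iff_ne,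
    ne_eq]
  have hd : digitVal c % 2 = 0 ∨ digitVal c % 2 = 1 := Int.emod_two_eq_zero_or_one _
  have hi : i % 2 = 0 ∨ i % 2 = 1 := Nat.mod_two_eq_zero_or_one i
  have : ((i : Int) % 2) = ((i % 2 : Nat) : Int) := by push_cast; ring_nf
  rcases hd with h1 | h1 <;> rcases hi with h2 | h2 <;> simp [h1, h2, this]

-- A's fused loop, characterised as parity validation followed by nt of the full sum.
lemma checkGo_split (cs : List Char) (i : Nat) (sum : Int) :
    checkGo cs i sum =
      if !((PySem.List.enumerate cs (i : Int)).all (fun p => digitVal p.2 % 2 == p.1 % 2))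
      then false
      else nt (sum + (cs.map digitVal).sum) := by
  induction cs generalizing i sum with
  | nil => simp [checkGo, PySem.List.enumerate_nil]
  | cons c rest ih =>
      simp only [checkGo, PySem.List.enumerate_cons, List.all_cons]
      by_cases hb : ((i % 2 == 0 && digitVal c % 2 == 1) || (i % 2 == 1 && digitVal c % 2 == 0)) = true
      · have : ¬ (digitVal c % 2 == (i : Int) % 2) = true := by
          intro h; rw [← parity_iff] at h; simp [h] at hb
        simp [hb, this]
      · have hb' := Bool.eq_false_iff.mpr hb
        have hp : (digitVal c % 2 == (i : Int) % 2) = true := (parity_iff i c).mp hb'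
        have hcast : ((i : Int) + 1) = ((i + 1 : Nat) : Int) := by push_cast; ring
        simp only [hb', hp, Bool.true_and, Bool.false_eq_true, if_false]
        rw [hcast, ih]
        simp only [List.map_cons, List.sum_cons, add_assoc]

-- ===== VERDICT (by name: the statement is the Claim_ definition above) =====
theorem check_spec : Claim_equal_check := by
  intro n _ _
  unfold Spec_check check check_alt
  rw [checkGo_split n.toList 0 0]
  simp only [Nat.cast_zero]
  have e1 : ((PySem.List.enumerate n.toList).any
       (fun p => !(PySem.Int.mod (digitVal p.2 - p.1) 2 == 0)))
      = !((PySem.List.enumerate n.toList 0).all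
           (fun p => digitVal p.2 % 2 == p.1 % 2)) := by
    simp only [parity_ord, List.all_eq_not_any_not, Bool.not_not]
  rw [e1]
  by_cases hall : ((PySem.List.enumerate n.toList 0).all
      (fun p => digitVal p.2 % 2 == p.1 % 2))
  · simp only [hall, Bool.not_true, Bool.false_eq_true, if_false, zero_add]
    exact nt_eq_full _
  · have h' := Bool.eq_false_iff.mpr hall
    rw [h']
    simp
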